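-- pv_equiv track=rewrite | github.com/mrSerega/net | hem.py | msg2bin
-- ===== SOURCE A (Python) =====
-- def msg2bin(msg, bin_len):
--     bin_msg = ''
--     for x in msg:
--         tmp=format(ord(x), 'b')
--         if len(tmp)==6:
--             tmp='0'+tmp
--         a = ''.join(tmp)
--         bin_msg = bin_msg + a
--     # print ('bin_msg: {}'.format(bin_msg))
--     bin_msg = bin_msg.replace(' ','')
--     ans = []
--     while len(bin_msg) > 0:
--         if len(bin_msg) < bin_len:
--             bin_msg = bin_msg + '1'
--             if len(bin_msg) >0:
--                 while(len(bin_msg)!=bin_len):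
--                     bin_msg = bin_msg+'0'
--             ans.append(bin_msg)
--             bin_msg = ''
--             break
--         else:
--             ans.append(bin_msg[:bin_len])
--             bin_msg = bin_msg[bin_len:]
--     return ans
-- ===== SOURCE B (Python) =====
-- def msg2bin(msg, bin_len):
--     bits = ''.join('0' + b if len(b) == 6 else b
--                    for b in (format(ord(c), 'b') for c in msg))
--     if not bits:
--         return []
--     r = len(bits) % bin_len
--     if r != 0:
--         bits += '1' + '0' * (bin_len - r - 1)
--     return [bits[i:i + bin_len] for i in range(0, len(bits), bin_len)]
-- ===== Notes on version B (the rewrite author's own statement) =====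
-- stated objective: simpler
-- what changed: A's while-loop that discovers the short remainder and zero-pads it inline (with a nested padding while-loop) is replaced by up-front arithmetic padding via len(bits) % bin_len followed by a single slicing comprehension.
import Mathlib
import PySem

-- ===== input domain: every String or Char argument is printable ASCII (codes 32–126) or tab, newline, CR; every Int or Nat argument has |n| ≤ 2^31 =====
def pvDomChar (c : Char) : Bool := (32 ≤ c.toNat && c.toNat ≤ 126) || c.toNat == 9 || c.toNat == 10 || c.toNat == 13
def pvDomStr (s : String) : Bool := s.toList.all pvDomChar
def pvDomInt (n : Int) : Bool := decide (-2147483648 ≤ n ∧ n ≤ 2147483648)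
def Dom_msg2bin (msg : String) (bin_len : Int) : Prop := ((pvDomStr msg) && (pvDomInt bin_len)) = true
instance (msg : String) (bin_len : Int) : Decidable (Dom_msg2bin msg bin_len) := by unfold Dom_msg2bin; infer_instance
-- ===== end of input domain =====

-- B replaces A's while-loop (which discovers the short remainder and zero-pads it inline)
-- by up-front arithmetic padding (len % bin_len) followed by a single slicing comprehension;
-- objective: simpler.

-- shared helper: format(n, 'b') — binary representation without leading zeros (both Pythons call it)
def pvNatBin (n : Nat) : List Char :=
  if _h : n < 2 then [if n = 1 then '1' else '0']
  else pvNatBin (n / 2) ++ [if n % 2 = 1 then '1' else '0']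
decreasing_by exact Nat.div_lt_self (by omega) (by omega)

-- ===== PORT A =====
-- inner `while(len(bin_msg)!=bin_len): bin_msg = bin_msg+'0'`; fuel bin_len.toNat is enough,
-- since the loop is only reached with len(bin_msg) ≤ bin_len
def pvPadLoop (bin_len : Int) : Nat → List Char → List Char
  | 0, s => s
  | f+1, s => if (s.length : Int) = bin_len then s else pvPadLoop bin_len f (s ++ ['0'])

-- outer `while len(bin_msg) > 0:`; fuel = initial length is enough when bin_len ≥ 1
-- (each pass drops bin_len ≥ 1 chars or breaks); Python A diverges for bin_len ≤ 0, excluded by Pre_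
def pvLoopA (bin_len : Int) : Nat → List Char → List (List Char) → List (List Char)
  | 0, _, ans => ans
  | f+1, bm, ans =>
    if bm.length = 0 then ans
    else if (bm.length : Int) < bin_len then
      let bm1 := bm ++ ['1']
      let bm2 := if bm1.length > 0 then pvPadLoop bin_len bin_len.toNat bm1 else bm1
      ans ++ [bm2]
    else
      pvLoopA bin_len f (PySem.List.slice bm (some bin_len) none)
        (ans ++ [PySem.List.slice bm none (some bin_len)])

def msg2bin (msg : String) (bin_len : Int) : List String :=
  let bin_msg := msg.toList.foldl (fun acc x =>
    let tmp := pvNatBin x.toNat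
    let tmp := if tmp.length = 6 then '0' :: tmp else tmp
    let a := tmp   -- ''.join(tmp) of a string is the string itself
    acc ++ a) []
  let bin_msg := PySem.Chars.replace bin_msg [' '] []
  (pvLoopA bin_len bin_msg.length bin_msg []).map String.mk

-- ===== PORT B =====
def msg2bin_alt (msg : String) (bin_len : Int) : List String :=
  let bits := (msg.toList.map (fun c =>
    let b := pvNatBin c.toNat
    if b.length = 6 then '0' :: b else b)).flatten
  if bits = [] then []
  else
    let r := PySem.Int.mod (bits.length : Int) bin_len
    let bits := if r ≠ 0 then bits ++ '1' :: List.replicate (bin_len - r - 1).toNat '0' else bits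
    (PySem.List.pyRange 0 (bits.length : Int) bin_len).map
      (fun i => String.mk (PySem.List.slice bits (some i) (some (i + bin_len))))

-- ===== PRECONDITION & SPEC =====
-- Pre_ excludes only bin_len ≤ 0 with a non-empty message, where Python A loops forever
-- (it never returns there); on msg = '' A returns [] for every bin_len, and that is inside Pre_.
def Pre_msg2bin (msg : String) (bin_len : Int) : Prop := msg = "" ∨ 1 ≤ bin_len
instance (msg : String) (bin_len : Int) : Decidable (Pre_msg2bin msg bin_len) := by
  unfold Pre_msg2bin; infer_instance

def pvWitness_msg2bin : String × Int := ("AB", 5)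

def Spec_msg2bin (msg : String) (bin_len : Int) (out : List String) : Prop := out = msg2bin_alt msg bin_len
instance (msg : String) (bin_len : Int) (out : List String) : Decidable (Spec_msg2bin msg bin_len out) := by unfold Spec_msg2bin; infer_instance

-- ===== CLAIM (what is proved, stated in full; the proofs are below) =====
def Claim_equal_msg2bin : Prop := ∀ (msg : String) (bin_len : Int), Dom_msg2bin msg bin_len → Pre_msg2bin msg bin_len → Spec_msg2bin msg bin_len (msg2bin msg bin_len)

-- ===== LEMMAS AND PROOFS =====

-- the per-char bit group both programs compute
def pvG (c : Char) : List Char :=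
  let b := pvNatBin c.toNat
  if b.length = 6 then '0' :: b else b

-- proof-side chunking function: common shape of A's loop and B's comprehension
def pvChunk (ℓ : Nat) : Nat → List Char → List (List Char)
  | 0, _ => []
  | f+1, s =>
    if s = [] then []
    else if s.length < ℓ then [s ++ '1' :: List.replicate (ℓ - s.length - 1) '0']
    else s.take ℓ :: pvChunk ℓ f (s.drop ℓ)

def pvPadOf (ℓ : Nat) (s : List Char) : List Char :=
  if s.length % ℓ = 0 then s else s ++ '1' :: List.replicate (ℓ - s.length % ℓ - 1) '0'

theorem pvChunk_nil (ℓ f : Nat) : pvChunk ℓ f [] = [] := by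
  cases f <;> simp [pvChunk]

theorem pvNatBin_mem (n : Nat) (c : Char) (h : c ∈ pvNatBin n) : c = '0' ∨ c = '1' := by
  induction n using pvNatBin.induct with
  | case1 n hn =>
    unfold pvNatBin at h
    rw [dif_pos hn] at h
    simp at h
    split at h <;> simp_all
  | case2 n hn ih =>
    unfold pvNatBin at h
    rw [dif_neg hn] at h
    rcases List.mem_append.mp h with h' | h'
    · exact ih h'
    · simp at h'; split at h' <;> simp_all

theorem pvReplace_go_not_mem (w : Char) (new : List Char) :
    ∀ (fuel : Nat) (l acc : List Char), w ∉ l →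
      PySem.Chars.replace.go [w] new fuel l acc = acc.reverse ++ l := by
  intro fuel
  induction fuel with
  | zero => intro l acc _; simp [PySem.Chars.replace.go]
  | succ f ih =>
    intro l acc hw
    cases l with
    | nil => simp [PySem.Chars.replace.go]
    | cons c t =>
      have hcw : (w == c) = false := by
        cases hq : w == c
        · rfl
        · exact absurd (by simp [(beq_iff_eq).mp hq]) hw
      have hne : [w].isPrefixOf (c :: t) = false := by
        simp [List.isPrefixOf, hcw]
      simp only [PySem.Chars.replace.go, hne, Bool.false_eq_true, if_false]
      rw [ih t (c :: acc) (fun ht => hw (List.mem_cons_of_mem _ ht))]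
      simp

theorem pvReplace_not_mem (l : List Char) (h : ' ' ∉ l) :
    PySem.Chars.replace l [' '] [] = l := by
  unfold PySem.Chars.replace
  simp only [List.isEmpty_cons, if_false, Bool.false_eq_true]
  rw [pvReplace_go_not_mem ' ' [] l.length l [] h]
  simp

-- the inner padding loop pads with zeros to exact length bin_len
theorem pvPadLoop_eq (L : Int) : ∀ (f : Nat) (s : List Char),
    (s.length : Int) ≤ L → L ≤ (s.length : Int) + (f : Int) →
    pvPadLoop L f s = s ++ List.replicate (L - s.length).toNat '0' := by
  intro f
  induction f with
  | zero =>
    intro s h1 h2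
    have : (s.length : Int) = L := by omega
    simp [pvPadLoop, this]
  | succ f ih =>
    intro s h1 h2
    by_cases he : (s.length : Int) = L
    · simp [pvPadLoop, he]
    · have hlt : (s.length : Int) < L := by omega
      simp only [pvPadLoop, if_neg he]
      rw [ih (s ++ ['0']) (by simp; omega) (by simp; push_cast; omega)]
      have hk : (L - (s.length : Int)).toNat = (L - ((s ++ ['0']).length : Int)).toNat + 1 := by
        simp; omega
      rw [hk, List.replicate_succ]
      simp

-- A's outer loop is pvChunk, fuel for fuel
theorem pvLoopA_eq (L : Int) (hL : 1 ≤ L) : ∀ (f : Nat) (s : List Char) (ans : List (List Char)),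
    pvLoopA L f s ans = ans ++ pvChunk L.toNat f s := by
  intro f
  induction f with
  | zero => intro s ans; simp [pvLoopA, pvChunk]
  | succ f ih =>
    intro s ans
    by_cases hs : s = []
    · subst hs; simp [pvLoopA, pvChunk]
    · have hlen : s.length ≠ 0 := by simp [hs]
      by_cases hlt : (s.length : Int) < L
      · have hltn : s.length < L.toNat := by omega
        simp only [pvLoopA, pvChunk, if_neg hlen, if_neg hs, if_pos hlt, if_pos hltn]
        have h1 : ((s ++ ['1']).length : Int) ≤ L := by simp; omega
        have h2 : L ≤ ((s ++ ['1']).length : Int) + (L.toNat : Int) := by simp; omega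
        rw [if_pos (by simp), pvPadLoop_eq L L.toNat (s ++ ['1']) h1 h2]
        simp
        omega
      · have hge : ¬ s.length < L.toNat := by omega
        simp only [pvLoopA, pvChunk, if_neg hlen, if_neg hs, if_neg hlt, if_neg hge]
        rw [PySem.List.slice_from _ (by omega), PySem.List.slice_to _ (by omega), ih]
        simp

-- chunking a list whose length is an exact multiple of ℓ, as a map over range
theorem pvChunkExact (ℓ : Nat) (hℓ : 1 ≤ ℓ) : ∀ (k f : Nat) (s : List Char),
    s.length = k * ℓ → k ≤ f →
    (List.range k).map (fun j => (s.drop (j * ℓ)).take ℓ) = pvChunk ℓ f s := by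
  intro k
  induction k with
  | zero =>
    intro f s hs _
    have : s = [] := by simpa using hs
    simp [this, pvChunk_nil]
  | succ k ih =>
    intro f s hs hf
    obtain ⟨f', rfl⟩ : ∃ f', f = f' + 1 := ⟨f - 1, by omega⟩
    have hsl : s.length = (k + 1) * ℓ := hs
    have hsne : s ≠ [] := by
      intro h; rw [h] at hsl; simp at hsl; omega
    have hge : ¬ s.length < ℓ := by rw [hsl]; nlinarith
    simp only [pvChunk, if_neg hsne, if_neg hge]
    rw [List.range_succ_eq_map]
    simp only [List.map_cons, List.map_map, Nat.zero_mul, List.drop_zero]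
    congr 1
    have hfun : ∀ j, ((fun j => (s.drop (j * ℓ)).take ℓ) ∘ (fun i => i + 1)) j
        = (fun j => ((s.drop ℓ).drop (j * ℓ)).take ℓ) j := by
      intro j
      simp [List.drop_drop, Nat.add_mul, Nat.add_comm]
    rw [funext hfun]
    exact ih f' (s.drop ℓ) (by rw [List.length_drop, hsl, Nat.succ_mul]; omega) (Nat.le_of_succ_le_succ hf)

-- padding first then chunking = chunking with the inline-pad rule, fuel for fuel
theorem pvChunk_padOf (ℓ : Nat) (hℓ : 1 ≤ ℓ) : ∀ (f : Nat) (s : List Char),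
    pvChunk ℓ f (pvPadOf ℓ s) = pvChunk ℓ f s := by
  intro f
  induction f with
  | zero => intro s; simp [pvChunk]
  | succ f ih =>
    intro s
    by_cases h0 : s.length % ℓ = 0
    · simp [pvPadOf, h0]
    · have hsne : s ≠ [] := by
        intro h; rw [h] at h0; simp at h0
      have hr1 : 1 ≤ s.length % ℓ := by omega
      have hrl : s.length % ℓ < ℓ := Nat.mod_lt _ (by omega)
      simp only [pvPadOf, if_neg h0]
      by_cases hlt : s.length < ℓ
      · have hmod : s.length % ℓ = s.length := Nat.mod_eq_of_lt hlt
        have hplen : (s ++ '1' :: List.replicate (ℓ - s.length % ℓ - 1) '0').length = ℓ := by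
          simp; omega
        have hpne : s ++ '1' :: List.replicate (ℓ - s.length % ℓ - 1) '0' ≠ [] := by
          simp
        rw [hmod] at hplen hpne
        rw [hmod]
        simp only [pvChunk, if_neg hpne, if_neg hsne, if_pos hlt, hplen]
        rw [if_neg (lt_irrefl ℓ), List.take_of_length_le (le_of_eq hplen),
          List.drop_eq_nil_of_le (le_of_eq hplen), pvChunk_nil]
      · have hgt : ℓ < s.length := by
          rcases Nat.lt_or_ge ℓ s.length with h | h
          · exact h
          · exfalso; have : s.length = ℓ := by omega
            rw [this] at h0; simp at h0
        have hpge : ¬ (s ++ '1' :: List.replicate (ℓ - s.length % ℓ - 1) '0').length < ℓ := by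
          simp; omega
        have hpne : s ++ '1' :: List.replicate (ℓ - s.length % ℓ - 1) '0' ≠ [] := by simp
        simp only [pvChunk, if_neg hpne, if_neg hsne, if_neg hlt, if_neg hpge]
        congr 1
        · exact List.take_append_of_le_length (by omega)
        · rw [List.drop_append_of_le_length (by omega)]
          have hmod' : (s.drop ℓ).length % ℓ = s.length % ℓ := by
            rw [List.length_drop]
            conv_rhs => rw [show s.length = ℓ + (s.length - ℓ) by omega]
            rw [Nat.add_mod_left]
          have := ih (s.drop ℓ)
          rw [pvPadOf, if_neg (by rw [hmod']; exact h0), hmod'] at this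
          exact this

-- B's pyRange/slice comprehension over an exact multiple is the range-map form
theorem pvRangeSlices (ℓ : Nat) (hℓ : 1 ≤ ℓ) (k : Nat) (s : List Char)
    (hs : s.length = k * ℓ) :
    (PySem.List.pyRange 0 (s.length : Int) (ℓ : Int)).map
        (fun i => PySem.List.slice s (some i) (some (i + (ℓ : Int))))
      = (List.range k).map (fun j => (s.drop (j * ℓ)).take ℓ) := by
  rw [PySem.List.pyRange_of_pos 0 (s.length : Int) (by exact_mod_cast hℓ)]
  have hcount : (if (0 : Int) < (s.length : Int)
      then (((s.length : Int) - 0 + (ℓ : Int) - 1) / (ℓ : Int)).toNat else 0) = k := by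
    by_cases hn : (0 : Int) < (s.length : Int)
    · rw [if_pos hn]
      have h1 : ((s.length : Int) - 0 + (ℓ : Int) - 1) = ((s.length + ℓ - 1 : Nat) : Int) := by
        omega
      rw [h1, ← Int.natCast_ediv]
      have h2 : (s.length + ℓ - 1) / ℓ = k := by
        rw [hs, Nat.mul_comm k ℓ]
        have h3 : ℓ * k + ℓ - 1 = (ℓ - 1) + ℓ * k := by omega
        rw [h3, Nat.add_mul_div_left _ _ (show 0 < ℓ by omega), Nat.div_eq_of_lt (by omega)]
        exact Nat.zero_add k
      rw [h2]; simp
    · rw [if_neg hn]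
      have : s.length = 0 := by omega
      rw [this] at hs
      rcases Nat.mul_eq_zero.mp hs.symm with h | h <;> omega
  rw [hcount, List.map_map]
  apply List.map_congr_left
  intro j _
  simp only [Function.comp]
  have h1 : (0 : Int) + (ℓ : Int) * (j : Int) = ((ℓ * j : Nat) : Int) := by push_cast; ring
  rw [h1, show ((ℓ * j : Nat) : Int) + (ℓ : Int) = ((ℓ * j : Nat) : Int) + ((ℓ : Nat) : Int) from rfl,
    PySem.List.slice_natCast_add]
  rw [Nat.mul_comm]

theorem pvNoSpace (l : List Char) : ' ' ∉ (l.map pvG).flatten := by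
  intro h
  rcases List.mem_flatten.mp h with ⟨g, hg, hsp⟩
  rcases List.mem_map.mp hg with ⟨c, _, rfl⟩
  have : (' ' : Char) = '0' ∨ (' ' : Char) = '1' := by
    simp only [pvG] at hsp
    split at hsp
    · rcases List.mem_cons.mp hsp with h' | h'
      · left; exact h'
      · exact pvNatBin_mem _ _ h'
    · exact pvNatBin_mem _ _ hsp
  rcases this with h' | h' <;> simp at h'

-- ===== VERDICT (by name: the statement is the Claim_ definition above) =====
theorem msg2bin_spec : Claim_equal_msg2bin := by
  intro msg bin_len _ hpre
  unfold Spec_msg2bin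
  rcases hpre with hmsg | hL
  · subst hmsg; rfl
  · have hL0 : (0 : Int) ≤ bin_len := by omega
    set ℓ := bin_len.toNat with hℓdef
    have hcast : (ℓ : Int) = bin_len := Int.toNat_of_nonneg hL0
    have hℓ1 : 1 ≤ ℓ := by omega
    -- the common bit string
    set bits := (msg.toList.map pvG).flatten with hbits
    -- A side
    have hfold : msg.toList.foldl (fun acc x =>
        let tmp := pvNatBin x.toNat
        let tmp := if tmp.length = 6 then '0' :: tmp else tmp
        let a := tmp
        acc ++ a) [] = bits := by
      rw [hbits]
      rw [show (fun (acc : List Char) (x : Char) =>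
        let tmp := pvNatBin x.toNat
        let tmp := if tmp.length = 6 then '0' :: tmp else tmp
        let a := tmp
        acc ++ a) = fun acc x => acc ++ pvG x from rfl]
      rw [PySem.List.foldl_append_eq_flatMap]
      simp [List.flatMap_def]
    have hrep : PySem.Chars.replace bits [' '] [] = bits :=
      pvReplace_not_mem bits (pvNoSpace msg.toList)
    have hA : msg2bin msg bin_len = (pvChunk ℓ bits.length bits).map String.mk := by
      unfold msg2bin
      simp only [hfold, hrep]
      rw [pvLoopA_eq bin_len hL bits.length bits []]
      simp [hℓdef]
    rw [hA]
    -- B side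
    have hBalt : msg2bin_alt msg bin_len =
        (if bits = [] then []
         else
           let r := PySem.Int.mod ((bits.length : Nat) : Int) bin_len
           let bits' := if r ≠ 0 then bits ++ '1' :: List.replicate (bin_len - r - 1).toNat '0'
             else bits
           (PySem.List.pyRange 0 ((bits'.length : Nat) : Int) bin_len).map
             (fun i => String.mk (PySem.List.slice bits' (some i) (some (i + bin_len))))) := rfl
    rw [hBalt]
    by_cases hb : bits = []
    · rw [if_pos hb, hb]
      simp [pvChunk_nil]
    · rw [if_neg hb]
      have hn1 : 1 ≤ bits.length := by
        have := List.length_pos_of_ne_nil hb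
        omega
      have hmod : PySem.Int.mod ((bits.length : Nat) : Int) bin_len
          = ((bits.length % ℓ : Nat) : Int) := by
        rw [← hcast]
        exact_mod_cast PySem.Int.mod_natCast bits.length ℓ
      have hdm : ℓ * (bits.length / ℓ) + bits.length % ℓ = bits.length :=
        Nat.div_add_mod bits.length ℓ
      have hml : bits.length % ℓ < ℓ := Nat.mod_lt _ (by omega)
      by_cases hr : bits.length % ℓ = 0
      · simp only [hmod]
        rw [if_neg (show ¬ (((bits.length % ℓ : Nat) : Int) ≠ 0) by rw [hr]; simp)]
        have hsk : bits.length = (bits.length / ℓ) * ℓ := by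
          rw [Nat.mul_comm (bits.length / ℓ) ℓ]; omega
        rw [show (fun i => String.mk (PySem.List.slice bits (some i) (some (i + bin_len))))
            = String.mk ∘ (fun i => PySem.List.slice bits (some i) (some (i + bin_len)))
            from rfl, ← List.map_map, ← hcast,
          pvRangeSlices ℓ hℓ1 (bits.length / ℓ) bits hsk,
          pvChunkExact ℓ hℓ1 (bits.length / ℓ) bits.length bits hsk (Nat.div_le_self _ _)]
      · simp only [hmod]
        rw [if_pos (show (((bits.length % ℓ : Nat) : Int) ≠ 0) from by exact_mod_cast hr)]
        have hcnt : (bin_len - ((bits.length % ℓ : Nat) : Int) - 1).toNat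
            = ℓ - bits.length % ℓ - 1 := by
          rw [← hcast]; omega
        rw [hcnt]
        have hpad : bits ++ '1' :: List.replicate (ℓ - bits.length % ℓ - 1) '0'
            = pvPadOf ℓ bits := by
          rw [pvPadOf, if_neg hr]
        rw [hpad]
        have hk : bits.length / ℓ + 1 ≤ bits.length := by
          by_cases h1 : ℓ = 1
          · exfalso; rw [h1] at hr; omega
          · have : bits.length / ℓ < bits.length := Nat.div_lt_self (by omega) (by omega)
            omega
        have hplen : (pvPadOf ℓ bits).length = (bits.length / ℓ + 1) * ℓ := by
          rw [pvPadOf, if_neg hr]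
          simp only [List.length_append, List.length_cons, List.length_replicate]
          rw [Nat.add_mul, Nat.one_mul, Nat.mul_comm (bits.length / ℓ) ℓ]
          omega
        rw [show (fun i => String.mk (PySem.List.slice (pvPadOf ℓ bits) (some i)
              (some (i + bin_len))))
            = String.mk ∘ (fun i => PySem.List.slice (pvPadOf ℓ bits) (some i)
              (some (i + bin_len))) from rfl, ← List.map_map, ← hcast,
          pvRangeSlices ℓ hℓ1 (bits.length / ℓ + 1) (pvPadOf ℓ bits) hplen,
          pvChunkExact ℓ hℓ1 (bits.length / ℓ + 1) bits.length (pvPadOf ℓ bits) hplen hk,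
          pvChunk_padOf ℓ hℓ1 bits.length bits]
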